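-- pv_equiv track=rewrite | github.com/Oneflow-Inc/oneflow | python/oneflow/framework/balanced_splitter.py | BalancedRanges
-- ===== SOURCE A (Python) =====
-- def BalancedPartNums(total, part_size):
--     base = int(total / part_size)
--     remainder = total % part_size
--     return [base + int(i < remainder) for i in range(part_size)]
--
-- def BalancedRanges(total, part_size):
--     balanced_part_nums = BalancedPartNums(total, part_size)
--     ranges = []
--     start = 0
--     for part_num in balanced_part_nums:
--         end = start + part_num
--         ranges.append((start, end))
--         start = end
--     return ranges
-- ===== SOURCE B (Python) =====
-- def BalancedRanges(total, part_size):
--     base = int(total / part_size)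
--     remainder = total % part_size
--     return [(i * base + min(i, remainder), (i + 1) * base + min(i + 1, remainder))
--             for i in range(part_size)]
-- ===== Notes on version B (the rewrite author's own statement) =====
-- stated objective: simpler
-- what changed: Replaces the helper BalancedPartNums plus the running-sum accumulator loop with a single comprehension that computes each range's start and end in closed form (i*base + min(i, remainder)).
import Mathlib
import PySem

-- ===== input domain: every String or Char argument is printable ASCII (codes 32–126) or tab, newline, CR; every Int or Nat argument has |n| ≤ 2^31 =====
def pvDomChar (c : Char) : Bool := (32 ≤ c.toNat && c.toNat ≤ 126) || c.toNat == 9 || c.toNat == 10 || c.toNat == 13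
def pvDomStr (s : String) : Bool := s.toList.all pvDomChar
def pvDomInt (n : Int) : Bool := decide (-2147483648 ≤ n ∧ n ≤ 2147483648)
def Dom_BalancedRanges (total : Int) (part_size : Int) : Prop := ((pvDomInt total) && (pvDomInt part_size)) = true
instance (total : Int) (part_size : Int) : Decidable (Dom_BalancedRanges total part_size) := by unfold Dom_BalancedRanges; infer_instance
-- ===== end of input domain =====

-- B drops the helper and running-sum loop of A and emits each range in closed form
-- from its index alone; same O(part_size) cost, shorter code (objective: simpler).
-- 'int(total / part_size)' is truncating division toward zero; on Dom (|n| ≤ 2^31) the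
-- float quotient truncates to the exact truncated quotient, so it is ported as Int.tdiv.

-- ===== PORT A =====
-- helper BalancedPartNums, transliterated
def BalancedPartNums (total : Int) (part_size : Int) : List Int :=
  let base := Int.tdiv total part_size          -- int(total / part_size): exact on Dom
  let remainder := PySem.Int.mod total part_size
  (PySem.List.pyRange 0 part_size 1).map (fun i => base + (if i < remainder then 1 else 0))

def BalancedRanges (total : Int) (part_size : Int) : List (Int × Int) :=
  let balanced_part_nums := BalancedPartNums total part_size
  let st := balanced_part_nums.foldl
    (fun (st : List (Int × Int) × Int) part_num =>
      (st.1 ++ [(st.2, st.2 + part_num)], st.2 + part_num)) ([], 0)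
  st.1

-- ===== PORT B =====
def BalancedRanges_alt (total : Int) (part_size : Int) : List (Int × Int) :=
  let base := Int.tdiv total part_size          -- int(total / part_size): exact on Dom
  let remainder := PySem.Int.mod total part_size
  (PySem.List.pyRange 0 part_size 1).map
    (fun i => (i * base + min i remainder, (i + 1) * base + min (i + 1) remainder))

-- ===== PRECONDITION & SPEC =====
-- Pre_ excludes part_size = 0, on which Python's division raises ZeroDivisionError.
def Pre_BalancedRanges (total : Int) (part_size : Int) : Prop := part_size ≠ 0
instance (total : Int) (part_size : Int) : Decidable (Pre_BalancedRanges total part_size) := by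
  unfold Pre_BalancedRanges; infer_instance

def pvWitness_BalancedRanges : Int × Int := (10, 3)

def Spec_BalancedRanges (total : Int) (part_size : Int) (out : List (Int × Int)) : Prop := out = BalancedRanges_alt total part_size
instance (total : Int) (part_size : Int) (out : List (Int × Int)) : Decidable (Spec_BalancedRanges total part_size out) := by unfold Spec_BalancedRanges; infer_instance

-- ===== CLAIM (what is proved, stated in full; the proofs are below) =====
def Claim_equal_BalancedRanges : Prop := ∀ (total : Int) (part_size : Int), Dom_BalancedRanges total part_size → Pre_BalancedRanges total part_size → Spec_BalancedRanges total part_size (BalancedRanges total part_size)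

-- ===== LEMMAS AND PROOFS =====

-- A's accumulator loop over range(0, m) computed in closed form, for 0 ≤ remainder:
-- after the whole loop the ranges list is exactly B's comprehension over the same range.
lemma balanced_fold_closed (base remainder : Int) (hr : 0 ≤ remainder) :
    ∀ (n : Nat),
      (((PySem.List.pyRange 0 (n : Int) 1).map
          (fun i => base + (if i < remainder then (1:Int) else 0))).foldl
        (fun (st : List (Int × Int) × Int) part_num =>
          (st.1 ++ [(st.2, st.2 + part_num)], st.2 + part_num)) ([], 0))
      = (((PySem.List.pyRange 0 (n : Int) 1).map
            (fun i => (i * base + min i remainder, (i + 1) * base + min (i + 1) remainder))),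
         (n : Int) * base + min (n : Int) remainder) := by
  intro n
  induction n with
  | zero => simp [PySem.List.pyRange_one_eq_nil le_rfl, min_eq_left hr]
  | succ k ih =>
    have hsplit : PySem.List.pyRange 0 ((k + 1 : Nat) : Int) 1
        = PySem.List.pyRange 0 (k : Int) 1 ++ [(k : Int)] := by
      push_cast
      exact PySem.List.pyRange_one_succ_right (by positivity)
    rw [hsplit, List.map_append, List.foldl_append, ih]
    simp only [List.map_cons, List.map_nil, List.foldl_cons, List.foldl_nil, Prod.mk.injEq]
    push_cast
    refine ⟨?_, ?_⟩
    · have : (k : Int) * base + min (k : Int) remainder + (base + (if (k : Int) < remainder then (1:Int) else 0))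
           = ((k : Int) + 1) * base + min ((k : Int) + 1) remainder := by
        by_cases h : (k : Int) < remainder
        · simp only [h, if_pos]
          have h1 : min (k : Int) remainder = (k : Int) := min_eq_left (le_of_lt h)
          have h2 : min ((k : Int) + 1) remainder = (k : Int) + 1 := min_eq_left (by omega)
          rw [h1, h2]; ring
        · simp only [h, if_neg, not_false_iff]
          have h1 : min (k : Int) remainder = remainder := min_eq_right (by omega)
          have h2 : min ((k : Int) + 1) remainder = remainder := min_eq_right (by omega)
          rw [h1, h2]; ring
      simp [this]
    · by_cases h : (k : Int) < remainder
      · have h1 : min (k : Int) remainder = (k : Int) := min_eq_left (le_of_lt h)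
        have h2 : min ((k : Int) + 1) remainder = (k : Int) + 1 := min_eq_left (by omega)
        simp only [h, if_pos, h1, h2]; ring
      · have h1 : min (k : Int) remainder = remainder := min_eq_right (by omega)
        have h2 : min ((k : Int) + 1) remainder = remainder := min_eq_right (by omega)
        simp only [h, if_neg, not_false_iff, h1, h2]; ring

-- ===== VERDICT (by name: the statement is the Claim_ definition above) =====
theorem BalancedRanges_spec : Claim_equal_BalancedRanges := by
  intro total part_size _ hpre
  unfold Spec_BalancedRanges BalancedRanges BalancedRanges_alt BalancedPartNums
  by_cases hp : 0 < part_size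
  · have hr : 0 ≤ PySem.Int.mod total part_size := by
      exact PySem.Int.mod_nonneg total hp
    have hn : part_size = ((part_size.toNat : Nat) : Int) := by omega
    rw [hn] at hr ⊢
    dsimp only
    rw [balanced_fold_closed _ _ hr part_size.toNat]
  · have hle : part_size ≤ 0 := by omega
    dsimp only
    simp [PySem.List.pyRange_one_eq_nil hle]
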